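-- pv_equiv track=rewrite | github.com/i-redbyte/leetcode | easy/unique morse code words/solution.py | uniqueMorseRepresentations1
-- ===== SOURCE A (Python) =====
-- from typing import List
--
-- def uniqueMorseRepresentations1(words: List[str]) -> int:
--     morse = [".-", "-...", "-.-.", "-..", ".", "..-.", "--.",
--              "....", "..", ".---", "-.-", ".-..", "--", "-.",
--              "---", ".--.", "--.-", ".-.", "...", "-", "..-",
--              "...-", ".--", "-..-", "-.--", "--.."]
--
--     result = {"".join(morse[ord(c) - ord('a')] for c in word)
--               for word in words}
--     return len(result)
-- ===== SOURCE B (Python) =====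
-- def uniqueMorseRepresentations1(words):
--     morse = [".-", "-...", "-.-.", "-..", ".", "..-.", "--.",
--              "....", "..", ".---", "-.-", ".-..", "--", "-.",
--              "---", ".--.", "--.-", ".-.", "...", "-", "..-",
--              "...-", ".--", "-..-", "-.--", "--.."]
--
--     def encode(word):
--         if word == "":
--             return ""
--         return morse[ord(word[0]) - ord('a')] + encode(word[1:])
--
--     codes = [encode(word) for word in words]
--     codes.sort()
--     count = 0
--     prev = None
--     for code in codes:
--         if prev is None or code != prev:
--             count += 1
--         prev = code
--     return count
-- ===== Notes on version B (the rewrite author's own statement) =====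
-- stated objective: alternative
-- what changed: Replaces the set comprehension (hash-set dedup of join-built encodings) with a recursive per-character encoder and a sort of the code list followed by one linear scan that counts adjacent changes.
import Mathlib
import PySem

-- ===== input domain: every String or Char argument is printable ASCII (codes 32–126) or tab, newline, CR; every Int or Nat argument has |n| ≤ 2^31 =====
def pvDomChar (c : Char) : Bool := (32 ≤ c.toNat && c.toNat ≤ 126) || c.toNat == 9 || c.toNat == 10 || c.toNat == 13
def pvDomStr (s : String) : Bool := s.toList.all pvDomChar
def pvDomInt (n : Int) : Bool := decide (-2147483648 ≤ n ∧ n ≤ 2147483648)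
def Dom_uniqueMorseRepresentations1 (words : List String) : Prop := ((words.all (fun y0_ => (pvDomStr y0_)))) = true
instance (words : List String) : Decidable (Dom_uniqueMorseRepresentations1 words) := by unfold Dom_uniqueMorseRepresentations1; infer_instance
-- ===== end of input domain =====

-- B replaces the set comprehension (hash-set dedup of join-built encodings) by a
-- recursive per-character encoder plus sort + one adjacent-change counting scan
-- (alternative algorithm, same exact result; not claimed faster).

-- ===== PORT A =====
def pvMorse : List String :=
  [".-", "-...", "-.-.", "-..", ".", "..-.", "--.",
   "....", "..", ".---", "-.-", ".-..", "--", "-.",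
   "---", ".--.", "--.-", ".-.", "...", "-", "..-",
   "...-", ".--", "-..-", "-.--", "--.."]

-- "".join(morse[ord(c) - ord('a')] for c in word); the .getD "" branch is only
-- reached where Python raises IndexError, which Pre_ excludes.
def pvEncWord (w : String) : String :=
  PySem.Str.join "" (w.toList.map (fun c => (PySem.List.pyGet? pvMorse ((c.toNat : Int) - 97)).getD ""))

def uniqueMorseRepresentations1 (words : List String) : Int :=
  ((PySem.Set.ofList (words.map pvEncWord)).length : Int)

-- ===== PORT B =====
-- Source B's local morse table (B re-declares it, so its port does too)
def pvMorseB : List String :=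
  [".-", "-...", "-.-.", "-..", ".", "..-.", "--.",
   "....", "..", ".---", "-.-", ".-..", "--", "-.",
   "---", ".--.", "--.-", ".-.", "...", "-", "..-",
   "...-", ".--", "-..-", "-.--", "--.."]

-- def encode(word): if word == "": return ""
--                   return morse[ord(word[0]) - ord('a')] + encode(word[1:])
-- (structural recursion on the character list; the .getD "" branch is only
-- reached where Python raises IndexError, excluded by Pre_)
def pvEncodeB : List Char → String
  | [] => ""
  | c :: cs => ((PySem.List.pyGet? pvMorseB ((c.toNat : Int) - 97)).getD "") ++ pvEncodeB cs

-- the for-loop of Source B over the sorted codes, state = (count, prev)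
def pvCountLoop : Int → Option String → List String → Int
  | count, _, [] => count
  | count, none, code :: rest => pvCountLoop (count + 1) (some code) rest
  | count, some prev, code :: rest =>
      if code ≠ prev then pvCountLoop (count + 1) (some code) rest
      else pvCountLoop count (some code) rest

def uniqueMorseRepresentations1_alt (words : List String) : Int :=
  pvCountLoop 0 none
    (PySem.List.sorted (words.map (fun word => pvEncodeB word.toList)) (fun x => x) false)

-- ===== PRECONDITION & SPEC =====
-- Pre_: every character code lies in [71,122] (so ord(c)-97 is a valid, possibly
-- negative, Python index into the 26-entry morse table); outside, A raises IndexError.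
def Pre_uniqueMorseRepresentations1 (words : List String) : Prop :=
  (words.all (fun w => w.toList.all (fun c => 71 ≤ c.toNat && c.toNat ≤ 122))) = true
instance (words : List String) : Decidable (Pre_uniqueMorseRepresentations1 words) := by
  unfold Pre_uniqueMorseRepresentations1; infer_instance
def pvWitness_uniqueMorseRepresentations1 : List String := ["ab", "a"]

def Spec_uniqueMorseRepresentations1 (words : List String) (out : Int) : Prop := out = uniqueMorseRepresentations1_alt words
instance (words : List String) (out : Int) : Decidable (Spec_uniqueMorseRepresentations1 words out) := by unfold Spec_uniqueMorseRepresentations1; infer_instance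

-- ===== CLAIM (what is proved, stated in full; the proofs are below) =====
def Claim_equal_uniqueMorseRepresentations1 : Prop := ∀ (words : List String), Dom_uniqueMorseRepresentations1 words → Pre_uniqueMorseRepresentations1 words → Spec_uniqueMorseRepresentations1 words (uniqueMorseRepresentations1 words)

-- ===== LEMMAS AND PROOFS =====

-- join with the empty separator is flatten
theorem pv_join_nil_flatten (l : List (List Char)) :
    PySem.Chars.join [] l = l.flatten := by
  induction l with
  | nil => simp [PySem.Chars.join_nil]
  | cons a rest ih =>
    cases rest with
    | nil => simp [PySem.Chars.join_singleton]
    | cons b r => rw [PySem.Chars.join_cons_cons] at *; simp_all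

-- the two morse tables are the same list
theorem pv_morse_eq : pvMorseB = pvMorse := rfl

-- B's recursive encoder produces exactly A's joined encoding
theorem pv_enc_eq (w : String) : pvEncodeB w.toList = pvEncWord w := by
  apply String.toList_inj.mp
  unfold pvEncWord PySem.Str.join
  rw [String.toList_ofList]
  have h0 : ("" : String).toList = ([] : List Char) := rfl
  rw [h0, pv_join_nil_flatten, List.map_map]
  induction w.toList with
  | nil => simp [pvEncodeB]
  | cons c cs ih => simp [pvEncodeB, pv_morse_eq, String.toList_append, ih]

theorem pv_card_insert_erase {α : Type} [DecidableEq α] (T : Finset α) (s : α) :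
    (insert s T).card = (T.erase s).card + 1 := by
  by_cases h : s ∈ T
  · rw [Finset.insert_eq_self.mpr h, ← Finset.card_erase_add_one h]
  · rw [Finset.erase_eq_of_notMem h, Finset.card_insert_of_notMem h]

-- the scan over a sorted tail with lower bound p counts the distinct values ≠ p
theorem pvCountLoop_some (ys : List String) (p : String) (k : Int)
    (hlb : ∀ y ∈ ys, p ≤ y) (hs : ys.Pairwise (· ≤ ·)) :
    pvCountLoop k (some p) ys = k + (((ys.toFinset.erase p).card : Int)) := by
  induction ys generalizing p k with
  | nil => simp [pvCountLoop]
  | cons s rest ih =>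
    have hps : p ≤ s := hlb s (List.mem_cons_self ..)
    have hrest : ∀ y ∈ rest, s ≤ y := fun y hy => List.rel_of_pairwise_cons hs hy
    have hs' : rest.Pairwise (· ≤ ·) := hs.of_cons
    by_cases hsp : s = p
    · subst hsp
      have : pvCountLoop k (some s) (s :: rest) = pvCountLoop k (some s) rest := by
        simp [pvCountLoop]
      rw [this, ih s k hrest hs']
      have : (s :: rest).toFinset.erase s = rest.toFinset.erase s := by
        simp [List.toFinset_cons, Finset.erase_insert_eq_erase]
      rw [this]
    · have hlt : p < s := lt_of_le_of_ne hps (fun h => hsp h.symm)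
      have : pvCountLoop k (some p) (s :: rest) = pvCountLoop (k + 1) (some s) rest := by
        simp [pvCountLoop, hsp]
      rw [this, ih s (k + 1) hrest hs']
      have hpnot : p ∉ (s :: rest).toFinset := by
        simp only [List.mem_toFinset, List.mem_cons]
        rintro (h | h)
        · exact hsp h.symm
        · exact absurd rfl (ne_of_gt (lt_of_lt_of_le hlt (hrest p h)))
      rw [Finset.erase_eq_of_notMem hpnot, List.toFinset_cons, pv_card_insert_erase]
      push_cast; ring

theorem pvCountLoop_none (ys : List String) (hs : ys.Pairwise (· ≤ ·)) :
    pvCountLoop 0 none ys = (ys.toFinset.card : Int) := by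
  cases ys with
  | nil => simp [pvCountLoop]
  | cons s rest =>
    have h1 : pvCountLoop 0 none (s :: rest) = pvCountLoop 1 (some s) rest := by
      simp [pvCountLoop]
    rw [h1, pvCountLoop_some rest s 1 (fun y hy => List.rel_of_pairwise_cons hs hy) hs.of_cons,
      List.toFinset_cons, pv_card_insert_erase]
    push_cast; ring

-- ===== VERDICT (by name: the statement is the Claim_ definition above) =====
theorem uniqueMorseRepresentations1_spec : Claim_equal_uniqueMorseRepresentations1 := by
  intro words _ _
  unfold Spec_uniqueMorseRepresentations1 uniqueMorseRepresentations1 uniqueMorseRepresentations1_alt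
  have hmap : words.map (fun word => pvEncodeB word.toList) = words.map pvEncWord :=
    List.map_congr_left (fun w _ => pv_enc_eq w)
  rw [hmap]
  set xs := words.map pvEncWord with hxs
  set ys := PySem.List.sorted xs (fun x => x) false with hys
  have hpair : ys.Pairwise (· ≤ ·) := PySem.List.sorted_pairwise xs (fun x => x)
  rw [pvCountLoop_none ys hpair]
  have hperm : ys.Perm xs := PySem.List.sorted_perm xs (fun x => x) false
  rw [List.toFinset_eq_of_perm ys xs hperm]
  have hnd : (PySem.Set.ofList xs).Nodup := PySem.Set.nodup_ofList xs
  have hfs : (PySem.Set.ofList xs).toFinset = xs.toFinset := by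
    apply Finset.ext
    intro a
    simp [List.mem_toFinset, PySem.Set.mem_ofList]
  rw [← hfs, List.toFinset_card_of_nodup hnd]
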